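-- pv_equiv track=rewrite | github.com/fyodorrss/RussianFishing4-Script | utils.py | get_fish_regions
-- ===== SOURCE A (Python) =====
-- start_x = 451
--
-- start_y = 175
--
-- width = 262
--
-- height = 198
--
-- dx = 284  # 每列间距
--
-- dy = 224  # 每行间距
--
-- cols = 5  # 每行鱼数量
--
-- def get_fish_regions(count):
--     """返回前 count 条鱼的区域坐标 (x, y, w, h)"""
--     regions = []
--     for i in range(count):
--         row = i // cols
--         col = i % cols
--         x = start_x + dx * col
--         y = start_y + dy * row
--         regions.append((x, y, width, height))
--     return regions
-- ===== SOURCE B (Python) =====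
-- start_x = 451
-- start_y = 175
-- width = 262
-- height = 198
-- dx = 284
-- dy = 224
-- cols = 5
--
-- def get_fish_regions(count):
--     """Preallocate the result list, then fill it row by row: an outer loop
--     over rows and an inner loop over that row's columns, writing each slot
--     by index; no per-element div/mod and no list growth."""
--     n = count if count > 0 else 0
--     regions = [None] * n
--     i = 0
--     row = 0
--     while i < n:
--         y = start_y + dy * row
--         for col in range(min(cols, n - i)):
--             regions[i] = (start_x + dx * col, y, width, height)
--             i += 1
--         row += 1
--     return regions
-- ===== Notes on version B (the rewrite author's own statement) =====
-- stated objective: alternative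
-- what changed: Replaces the flat loop over range(count) with per-element div/mod by a preallocate-then-fill scheme: the result list is allocated up front and filled row by row (outer loop over rows, inner loop over that row's columns) by index, with no division, modulo or list growth.
import Mathlib
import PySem

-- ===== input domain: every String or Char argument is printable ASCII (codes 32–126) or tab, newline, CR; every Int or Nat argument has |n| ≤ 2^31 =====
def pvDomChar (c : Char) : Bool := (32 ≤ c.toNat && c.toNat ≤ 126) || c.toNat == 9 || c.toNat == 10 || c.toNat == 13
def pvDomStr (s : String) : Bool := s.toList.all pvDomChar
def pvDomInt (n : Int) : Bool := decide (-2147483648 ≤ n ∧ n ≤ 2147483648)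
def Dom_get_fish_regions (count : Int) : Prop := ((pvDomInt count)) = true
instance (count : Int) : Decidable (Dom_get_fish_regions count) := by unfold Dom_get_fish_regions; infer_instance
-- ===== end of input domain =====

-- B replaces A's flat range(count) loop with per-element div/mod by a nested
-- row/column traversal keeping a remaining counter (objective: alternative).

-- ===== PORT A =====
def get_fish_regions (count : Int) : List (Int × Int × Int × Int) :=
  (PySem.List.pyRange 0 count 1).foldl
    (fun regions i =>
      let row := PySem.Int.floordiv i 5
      let col := PySem.Int.mod i 5
      let x := 451 + 284 * col
      let y := 175 + 224 * row
      regions ++ [(x, y, 262, 198)]) []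

-- ===== PORT B =====
-- Source B preallocates `regions = [None] * n` and writes slot i in strictly
-- increasing order (slot i is written exactly when i slots are filled), so
-- the port carries the filled prefix of the list; exact for the return value.
-- inner `for col in range(...)` loop: fills one row, stepping i by 1 per slot
def pvFillRow (colList : List Int) (y : Int) (i : Int)
    (regions : List (Int × Int × Int × Int)) : List (Int × Int × Int × Int) × Int :=
  match colList with
  | [] => (regions, i)
  | col :: rest => pvFillRow rest y (i + 1) (regions ++ [(451 + 284 * col, y, 262, 198)])

lemma pvFillRow_snd (colList : List Int) (y i : Int) (regions : List (Int × Int × Int × Int)) :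
    (pvFillRow colList y i regions).2 = i + colList.length := by
  induction colList generalizing i regions with
  | nil => simp [pvFillRow]
  | cons c rest ih => simp [pvFillRow, ih]; omega

-- outer `while i < n` loop
def pvFill (n i row : Int) (regions : List (Int × Int × Int × Int)) :
    List (Int × Int × Int × Int) :=
  if h : i < n then
    let y := 175 + 224 * row
    let p := pvFillRow (PySem.List.pyRange 0 (min 5 (n - i)) 1) y i regions
    pvFill n p.2 (row + 1) p.1
  else regions
termination_by (n - i).toNat
decreasing_by
  simp only [pvFillRow_snd, PySem.List.length_pyRange_one]
  omega

def get_fish_regions_alt (count : Int) : List (Int × Int × Int × Int) :=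
  let n := if count > 0 then count else 0
  pvFill n 0 0 []

-- ===== PRECONDITION & SPEC =====
def Spec_get_fish_regions (count : Int) (out : List (Int × Int × Int × Int)) : Prop := out = get_fish_regions_alt count
instance (count : Int) (out : List (Int × Int × Int × Int)) : Decidable (Spec_get_fish_regions count out) := by unfold Spec_get_fish_regions; infer_instance

-- ===== CLAIM (what is proved, stated in full; the proofs are below) =====
def Claim_equal_get_fish_regions : Prop := ∀ (count : Int), Dom_get_fish_regions count → Spec_get_fish_regions count (get_fish_regions count)

-- ===== LEMMAS AND PROOFS =====

-- canonical form both ports are reduced to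
def pvSpecF (row : Int) (k : Nat) : Int × Int × Int × Int :=
  (451 + 284 * ((k % 5 : Nat) : Int), 175 + 224 * (row + ((k / 5 : Nat) : Int)), 262, 198)

lemma portA_eq (count : Int) :
    get_fish_regions count = (List.range count.toNat).map (pvSpecF 0) := by
  unfold get_fish_regions
  rw [PySem.List.foldl_append_singleton_eq_map, PySem.List.pyRange_one, List.map_map]
  simp only [Int.sub_zero, List.nil_append]
  refine List.map_congr_left (fun k _ => ?_)
  simp [pvSpecF]

lemma pvFillRow_fst (colList : List Int) (y i : Int) (regions : List (Int × Int × Int × Int)) :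
    (pvFillRow colList y i regions).1
      = regions ++ colList.map (fun col => (451 + 284 * col, y, 262, 198)) := by
  induction colList generalizing i regions with
  | nil => simp [pvFillRow]
  | cons c rest ih => simp [pvFillRow, ih]

lemma pvFill_eq (m : Nat) (n i row : Int) (regions : List (Int × Int × Int × Int))
    (hm : (n - i).toNat = m) :
    pvFill n i row regions = regions ++ (List.range m).map (pvSpecF row) := by
  induction m using Nat.strong_induction_on generalizing i row regions with
  | _ m ih =>
    rcases Nat.eq_zero_or_pos m with h0 | hpos
    · subst h0
      rw [pvFill]
      simp only [show ¬ (i < n) by omega, dite_false]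
      simp
    · have hlt : i < n := by omega
      rw [pvFill]
      simp only [hlt, dite_true, pvFillRow_snd, pvFillRow_fst, PySem.List.length_pyRange_one]
      set t : Nat := min 5 m with ht
      have hmin : min 5 (n - i) = (t : Int) := by omega
      rw [hmin]
      simp only [Int.sub_zero, Int.toNat_natCast]
      rw [ih (m - t) (by omega) (i + t) (row + 1) _ (by omega), PySem.List.pyRange_one]
      have hrange : List.range m = List.range t ++ (List.range (m - t)).map (t + ·) := by
        have : m = t + (m - t) := by omega
        rw [this, List.range_add]
        simp [ht]
      rw [hrange, List.map_append, List.map_map, List.append_assoc]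
      congr 2
      · simp only [Int.sub_zero, Int.toNat_natCast]
        refine List.map_congr_left (fun k hk => ?_)
        have hk5 : k < 5 := by have := List.mem_range.mp hk; omega
        have h1 : k % 5 = k := Nat.mod_eq_of_lt hk5
        have h2 : k / 5 = 0 := Nat.div_eq_of_lt hk5
        simp only [Function.comp, pvSpecF, Prod.mk.injEq, h1, h2]
        push_cast
        refine ⟨by omega, by omega, trivial⟩
      · rw [List.map_map]
        refine List.map_congr_left (fun j hj => ?_)
        have ht5 : t = 5 := by
          have : m - t ≠ 0 := by
            intro h; rw [h] at hj; simp at hj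
          omega
        have h1 : (5 + j) % 5 = j % 5 := by omega
        have h2 : (5 + j) / 5 = j / 5 + 1 := by omega
        simp only [Function.comp, pvSpecF, Prod.mk.injEq, ht5, h1, h2]
        push_cast
        refine ⟨trivial, by ring, trivial⟩

-- ===== VERDICT (by name: the statement is the Claim_ definition above) =====
theorem get_fish_regions_spec : Claim_equal_get_fish_regions := by
  intro count _
  unfold Spec_get_fish_regions get_fish_regions_alt
  rw [portA_eq, pvFill_eq count.toNat _ 0 0 [] (by split_ifs <;> omega)]
  simp
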